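-- pv_equiv track=rewrite | github.com/jmfveneroso/ner-on-html | keras_test/hmm_proto.py | states_to_idx
-- ===== SOURCE A (Python) =====
-- num_labels = 3
--
-- time_steps = 4
--
-- def states_to_idx(states):
--   if len(states) < time_steps:
--     raise Exception('Wrong states length.')
--
--   acc = 0
--   multiplier = 1
--   for s in reversed(states):
--     acc += int(multiplier) * int(s)
--     multiplier *= num_labels
--   return acc
-- ===== SOURCE B (Python) =====
-- num_labels = 3
--
-- time_steps = 4
--
-- def states_to_idx(states):
--   if len(states) < time_steps:
--     raise Exception('Wrong states length.')
--   acc = 0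
--   for s in states:
--     acc = acc * num_labels + int(s)
--   return acc
-- ===== Notes on version B (the rewrite author's own statement) =====
-- stated objective: idiomatic
-- what changed: Replaced the reversed iteration that maintains a separate place-value multiplier by a forward Horner fold keeping only the accumulator.
import Mathlib
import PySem

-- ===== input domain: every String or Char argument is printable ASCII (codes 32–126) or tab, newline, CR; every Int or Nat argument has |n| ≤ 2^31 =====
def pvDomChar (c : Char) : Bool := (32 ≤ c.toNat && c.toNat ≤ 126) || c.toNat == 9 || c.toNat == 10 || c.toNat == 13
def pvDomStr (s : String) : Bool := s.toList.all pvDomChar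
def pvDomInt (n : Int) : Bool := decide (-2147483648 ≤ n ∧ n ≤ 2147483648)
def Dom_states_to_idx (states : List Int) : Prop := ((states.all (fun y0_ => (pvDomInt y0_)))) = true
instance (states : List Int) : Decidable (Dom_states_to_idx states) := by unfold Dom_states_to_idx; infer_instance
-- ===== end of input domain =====

-- B replaces the reversed iteration with an explicit multiplier by a forward Horner fold (idiomatic; same cost).
-- Pre_ excludes inputs with fewer than time_steps (=4) states, on which the Python raises Exception.

-- ===== PORT A =====
-- A: guard, then acc/multiplier loop over reversed(states).
def states_to_idx (states : List Int) : Int :=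
  if states.length < 4 then 0  -- Python raises here; excluded by Pre_
  else
    (states.reverse.foldl (fun (st : Int × Int) s => (st.1 + st.2 * s, st.2 * 3)) (0, 1)).1

-- ===== PORT B =====
def states_to_idx_alt (states : List Int) : Int :=
  if states.length < 4 then 0  -- Python raises here; excluded by Pre_
  else
    states.foldl (fun acc s => acc * 3 + s) 0

-- ===== PRECONDITION & SPEC =====
def Pre_states_to_idx (states : List Int) : Prop := 4 ≤ states.length
instance (states : List Int) : Decidable (Pre_states_to_idx states) := by unfold Pre_states_to_idx; infer_instance
def pvWitness_states_to_idx : List Int := [1, 0, 2, 1]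
def Spec_states_to_idx (states : List Int) (out : Int) : Prop := out = states_to_idx_alt states
instance (states : List Int) (out : Int) : Decidable (Spec_states_to_idx states out) := by unfold Spec_states_to_idx; infer_instance

-- ===== CLAIM (what is proved, stated in full; the proofs are below) =====
def Claim_equal_states_to_idx : Prop := ∀ (states : List Int), Dom_states_to_idx states → Pre_states_to_idx states → Spec_states_to_idx states (states_to_idx states)

-- ===== LEMMAS AND PROOFS =====

-- little-endian value of a digit list (units digit first)
def pvLval : List Int → Int
  | [] => 0
  | x :: t => x + 3 * pvLval t

theorem pvFoldA (r : List Int) : ∀ a m : Int,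
    (r.foldl (fun (st : Int × Int) s => (st.1 + st.2 * s, st.2 * 3)) (a, m)).1 = a + m * pvLval r := by
  induction r with
  | nil => intro a m; simp [pvLval]
  | cons x t ih => intro a m; simp only [List.foldl, pvLval]; rw [ih]; ring

theorem pvLval_append (r : List Int) (x : Int) :
    pvLval (r ++ [x]) = pvLval r + 3 ^ r.length * x := by
  induction r with
  | nil => simp [pvLval]
  | cons y t ih => simp only [List.cons_append, pvLval, ih, List.length_cons]; ring

theorem pvFoldB (l : List Int) : ∀ a : Int,
    l.foldl (fun acc s => acc * 3 + s) a = a * 3 ^ l.length + pvLval l.reverse := by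
  induction l with
  | nil => intro a; simp [pvLval]
  | cons x t ih =>
    intro a
    simp only [List.foldl, List.reverse_cons, List.length_cons]
    rw [ih, pvLval_append, List.length_reverse]
    ring

-- ===== VERDICT (by name: the statement is the Claim_ definition above) =====
theorem states_to_idx_spec : Claim_equal_states_to_idx := by
  intro states _ hpre
  unfold Spec_states_to_idx states_to_idx states_to_idx_alt Pre_states_to_idx at *
  rw [if_neg (by omega), if_neg (by omega), pvFoldA, pvFoldB]
  simp
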